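-- pv_equiv track=rewrite | github.com/baronstudio/BlenderAddon | T4A_quick_baker/source/utils/udim_bake.py | split_udims_by_group
-- ===== SOURCE A (Python) =====
-- def split_udims_by_group(lst):
--     result = []
--     sublist = [lst[0]]
--     for i in range(1, len(lst)):
--         if lst[i] - lst[i - 1] == 1:
--             sublist.append(lst[i])
--         else:
--             result.append(sublist)
--             sublist = [lst[i]]
--     result.append(sublist)
--     return result
-- ===== SOURCE B (Python) =====
-- def split_udims_by_group(lst):
--     n = len(lst)
--     bounds = [0] + [i for i in range(1, n) if lst[i] - lst[i - 1] != 1] + [n]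
--     return [lst[a:b] for a, b in zip(bounds, bounds[1:])]
-- ===== Notes on version B (the rewrite author's own statement) =====
-- stated objective: simpler
-- what changed: Instead of a left-to-right loop carrying a result/sublist accumulator pair, B computes the break positions (indices where the adjacent difference is not 1) in one comprehension and returns the slices between consecutive bounds.
import Mathlib
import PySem

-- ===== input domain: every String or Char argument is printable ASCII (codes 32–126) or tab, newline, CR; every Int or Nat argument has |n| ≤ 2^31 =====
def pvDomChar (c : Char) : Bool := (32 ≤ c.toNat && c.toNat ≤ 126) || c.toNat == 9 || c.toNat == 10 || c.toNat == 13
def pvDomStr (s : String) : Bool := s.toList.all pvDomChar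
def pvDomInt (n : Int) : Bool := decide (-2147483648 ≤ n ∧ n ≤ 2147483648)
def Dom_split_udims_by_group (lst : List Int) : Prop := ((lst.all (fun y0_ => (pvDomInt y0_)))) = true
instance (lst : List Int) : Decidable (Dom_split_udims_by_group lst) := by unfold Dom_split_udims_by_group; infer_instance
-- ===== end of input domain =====

-- B computes the break indices in one pass and slices between consecutive bounds instead of A's accumulator loop (same O(n) cost, a plainer shape).

-- ===== PORT A =====
def split_udims_by_group (lst : List Int) : List (List Int) :=
  let st := (PySem.List.pyRange 1 (lst.length : Int) 1).foldl
    (fun st i =>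
      if PySem.List.pyGetD lst i 0 - PySem.List.pyGetD lst (i - 1) 0 == 1 then
        (st.1, st.2 ++ [PySem.List.pyGetD lst i 0])
      else
        (st.1 ++ [st.2], [PySem.List.pyGetD lst i 0]))
    ([], [PySem.List.pyGetD lst 0 0])
  st.1 ++ [st.2]

-- ===== PORT B =====
def split_udims_by_group_alt (lst : List Int) : List (List Int) :=
  let n : Int := lst.length
  let bounds : List Int :=
    0 :: ((PySem.List.pyRange 1 n 1).filter
      (fun i => !(PySem.List.pyGetD lst i 0 - PySem.List.pyGetD lst (i - 1) 0 == 1)) ++ [n])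
  (bounds.zip bounds.tail).map (fun ab => PySem.List.slice lst (some ab.1) (some ab.2))

-- ===== PRECONDITION & SPEC =====
-- Pre_ excludes only the empty list, on which A raises IndexError (lst[0]).
def Pre_split_udims_by_group (lst : List Int) : Prop := lst ≠ []
instance (lst : List Int) : Decidable (Pre_split_udims_by_group lst) := by unfold Pre_split_udims_by_group; infer_instance
def pvWitness_split_udims_by_group : List Int := [10, 11, 13]
def Spec_split_udims_by_group (lst : List Int) (out : List (List Int)) : Prop := out = split_udims_by_group_alt lst
instance (lst : List Int) (out : List (List Int)) : Decidable (Spec_split_udims_by_group lst out) := by unfold Spec_split_udims_by_group; infer_instance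

-- ===== CLAIM (what is proved, stated in full; the proofs are below) =====
def Claim_equal_split_udims_by_group : Prop := ∀ (lst : List Int), Dom_split_udims_by_group lst → Pre_split_udims_by_group lst → Spec_split_udims_by_group lst (split_udims_by_group lst)

-- ===== LEMMAS AND PROOFS =====

def runStep (cond : Int → Bool) (v : Int → Int) (st : List (List Int) × List Int) (i : Int) : List (List Int) × List Int :=
  if cond i then (st.1, st.2 ++ [v i]) else (st.1 ++ [st.2], [v i])

lemma pullout (cond : Int → Bool) (v : Int → Int) :
    ∀ (is : List Int) (res : List (List Int)) (sub : List Int),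
      is.foldl (runStep cond v) (res, sub)
      = (res ++ (is.foldl (runStep cond v) ([], sub)).1,
         (is.foldl (runStep cond v) ([], sub)).2) := by
  intro is
  induction is with
  | nil => intro res sub; simp
  | cons i is ih =>
    intro res sub
    by_cases h : cond i = true
    · simp [runStep, h, ih res (sub ++ [v i])]
    · simp only [List.foldl_cons, runStep, h, Bool.false_eq_true, ite_false, List.nil_append]
      rw [ih (res ++ [sub]) [v i], ih [sub] [v i]]
      simp

lemma consSub (cond : Int → Bool) (v : Int → Int) :
    ∀ (is : List Int) (x : Int) (sub : List Int),
      is.foldl (runStep cond v) ([], x :: sub)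
      = (match is.foldl (runStep cond v) ([], sub) with
         | ([], s) => ([], x :: s)
         | (g :: gs, s) => ((x :: g) :: gs, s)) := by
  intro is
  induction is with
  | nil => intro x sub; simp
  | cons i is ih =>
    intro x sub
    by_cases h : cond i = true
    · have : (x :: sub) ++ [v i] = x :: (sub ++ [v i]) := by simp
      simp only [List.foldl_cons, runStep, h, ite_true]
      rw [this, ih x (sub ++ [v i])]
    · simp only [List.foldl_cons, runStep, h, Bool.false_eq_true, ite_false, List.nil_append]
      rw [pullout cond v is [x :: sub] [v i], pullout cond v is [sub] [v i]]
      simp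

lemma pyRange_shift : ∀ (k : Nat) (a b : Int), (b - a).toNat = k →
    PySem.List.pyRange (a + 1) (b + 1) 1 = (PySem.List.pyRange a b 1).map (· + 1) := by
  intro k
  induction k with
  | zero =>
    intro a b hk
    rw [PySem.List.pyRange_one_eq_nil (by omega), PySem.List.pyRange_one_eq_nil (by omega)]
    rfl
  | succ k ih =>
    intro a b hk
    rw [PySem.List.pyRange_one_cons (by omega), PySem.List.pyRange_one_cons (a := a) (by omega)]
    simp only [List.map_cons]
    rw [ih (a + 1) b (by omega)]

lemma pyGetD_cons_succ (x : Int) (xs : List Int) (i : Int) (h : 0 ≤ i) (d : Int) :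
    PySem.List.pyGetD (x :: xs) (i + 1) d = PySem.List.pyGetD xs i d := by
  rw [PySem.List.pyGetD_of_nonneg _ _ (by omega), PySem.List.pyGetD_of_nonneg _ _ h]
  have : (i + 1).toNat = i.toNat + 1 := by omega
  rw [this]
  rfl

def condA (lst : List Int) (i : Int) : Bool :=
  PySem.List.pyGetD lst i 0 - PySem.List.pyGetD lst (i - 1) 0 == 1

def valA (lst : List Int) (i : Int) : Int := PySem.List.pyGetD lst i 0

lemma condA_shift (x : Int) (lst : List Int) (i : Int) (h : 1 ≤ i) :
    condA (x :: lst) (i + 1) = condA lst i := by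
  unfold condA
  have h1 : i + 1 - 1 = (i - 1) + 1 := by omega
  rw [pyGetD_cons_succ x lst i (by omega), h1, pyGetD_cons_succ x lst (i - 1) (by omega)]

lemma valA_shift (x : Int) (lst : List Int) (i : Int) (h : 1 ≤ i) :
    valA (x :: lst) (i + 1) = valA lst i := by
  unfold valA; rw [pyGetD_cons_succ x lst i (by omega)]

lemma fold_shift (x : Int) (lst : List Int) (st : List (List Int) × List Int) :
    (PySem.List.pyRange 2 ((lst.length : Int) + 1) 1).foldl (runStep (condA (x :: lst)) (valA (x :: lst))) st
    = (PySem.List.pyRange 1 (lst.length : Int) 1).foldl (runStep (condA lst) (valA lst)) st := by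
  have h2 : (2 : Int) = 1 + 1 := by norm_num
  rw [h2, pyRange_shift ((lst.length : Int) - 1).toNat 1 (lst.length : Int) rfl, List.foldl_map]
  exact PySem.List.foldl_congr_mem _ _ _ _ (by
    intro acc i hi
    have hb := (PySem.List.mem_pyRange_one.mp hi).1
    simp only [runStep, condA_shift x lst i hb, valA_shift x lst i hb])

lemma filter_shift (x : Int) (lst : List Int) :
    (PySem.List.pyRange 2 ((lst.length : Int) + 1) 1).filter (fun i => !condA (x :: lst) i)
    = ((PySem.List.pyRange 1 (lst.length : Int) 1).filter (fun i => !condA lst i)).map (· + 1) := by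
  have h2 : (2 : Int) = 1 + 1 := by norm_num
  rw [h2, pyRange_shift ((lst.length : Int) - 1).toNat 1 (lst.length : Int) rfl, List.filter_map]
  congr 1
  apply List.filter_congr
  intro i hi
  have hb := (PySem.List.mem_pyRange_one.mp hi).1
  simp only [Function.comp_apply, condA_shift x lst i hb]

lemma slice_zero_succ (x : Int) (rest : List Int) (c : Int) (h : 0 ≤ c) :
    PySem.List.slice (x :: rest) (some 0) (some (c + 1)) = x :: PySem.List.slice rest (some 0) (some c) := by
  rw [PySem.List.slice_toNat _ le_rfl (by omega), PySem.List.slice_toNat _ le_rfl h]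
  have : (c + 1).toNat = c.toNat + 1 := by omega
  simp [this]

lemma slice_one_succ (x : Int) (rest : List Int) (c : Int) (h : 0 ≤ c) :
    PySem.List.slice (x :: rest) (some 1) (some (c + 1)) = PySem.List.slice rest (some 0) (some c) := by
  rw [PySem.List.slice_toNat _ (by omega) (by omega), PySem.List.slice_toNat _ le_rfl h]
  have : (c + 1).toNat = c.toNat + 1 := by omega
  simp [this]

lemma slice_succ_succ (x : Int) (rest : List Int) (a b : Int) (ha : 0 ≤ a) (hb : 0 ≤ b) :
    PySem.List.slice (x :: rest) (some (a + 1)) (some (b + 1)) = PySem.List.slice rest (some a) (some b) := by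
  rw [PySem.List.slice_toNat _ (by omega) (by omega), PySem.List.slice_toNat _ ha hb]
  have h1 : (a + 1).toNat = a.toNat + 1 := by omega
  have h2 : (b + 1).toNat = b.toNat + 1 := by omega
  simp [h1, h2]

lemma zip_tail_shift (x : Int) (rest : List Int) :
    ∀ (ws : List Int), (∀ z ∈ ws, 0 ≤ z) →
      ((ws.map (· + 1)).zip (ws.map (· + 1)).tail).map
          (fun ab => PySem.List.slice (x :: rest) (some ab.1) (some ab.2))
      = (ws.zip ws.tail).map (fun ab => PySem.List.slice rest (some ab.1) (some ab.2)) := by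
  intro ws
  induction ws with
  | nil => intro _; rfl
  | cons w ws ih =>
    intro hnn
    cases ws with
    | nil => rfl
    | cons w2 ws2 =>
      have := ih (by intro z hz; exact hnn z (by simp [hz]))
      simp only [List.map_cons, List.tail_cons, List.zip_cons_cons] at this ⊢
      rw [slice_succ_succ x rest w w2 (hnn w (by simp)) (hnn w2 (by simp)), this]

def extendRun (x : Int) (c : Bool) (gs : List (List Int)) : List (List Int) :=
  match c, gs with
  | true, g :: rest => (x :: g) :: rest
  | _, _ => [x] :: gs

lemma A_def (lst : List Int) : split_udims_by_group lst =
    (((PySem.List.pyRange 1 (lst.length : Int) 1).foldl (runStep (condA lst) (valA lst))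
        ([], [PySem.List.pyGetD lst 0 0])).1
      ++ [((PySem.List.pyRange 1 (lst.length : Int) 1).foldl (runStep (condA lst) (valA lst))
        ([], [PySem.List.pyGetD lst 0 0])).2]) := rfl

lemma A_base (x : Int) : split_udims_by_group [x] = [[x]] := rfl

lemma B_base (x : Int) : split_udims_by_group_alt [x] = [[x]] := rfl

lemma extendRun_false (x : Int) (gs : List (List Int)) : extendRun x false gs = [x] :: gs := by
  cases gs <;> rfl

lemma A_succ (x y : Int) (t : List Int) :
    split_udims_by_group (x :: y :: t) = extendRun x (y - x == 1) (split_udims_by_group (y :: t)) := by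
  rw [A_def, A_def]
  have hlen : ((x :: y :: t).length : Int) = ((y :: t).length : Int) + 1 := by
    simp
  have hget0 : PySem.List.pyGetD (x :: y :: t) 0 0 = x := by
    rw [PySem.List.pyGetD_of_nonneg _ _ le_rfl]; rfl
  have hget0' : PySem.List.pyGetD (y :: t) 0 0 = y := by
    rw [PySem.List.pyGetD_of_nonneg _ _ le_rfl]; rfl
  have hcond1 : condA (x :: y :: t) 1 = (y - x == 1) := by
    unfold condA
    rw [PySem.List.pyGetD_of_nonneg _ _ (by omega), show (1:Int) - 1 = 0 by norm_num,
        PySem.List.pyGetD_of_nonneg _ _ le_rfl]; rfl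
  have hval1 : valA (x :: y :: t) 1 = y := by
    unfold valA; rw [PySem.List.pyGetD_of_nonneg _ _ (by omega)]; rfl
  rw [hlen, PySem.List.pyRange_one_cons (by simp), List.foldl_cons]
  have hrs : runStep (condA (x :: y :: t)) (valA (x :: y :: t)) ([], [PySem.List.pyGetD (x :: y :: t) 0 0]) 1
      = (if (y - x == 1) then ([], [x, y]) else ([[x]], [y])) := by
    unfold runStep
    rw [hcond1, hval1, hget0]
    by_cases h : (y - x == 1) = true <;> simp [h]
  rw [hrs, show (1:Int) + 1 = 2 by norm_num, fold_shift x (y :: t)]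
  by_cases h : (y - x == 1) = true
  · rw [if_pos h, h]
    have hxy : ([x, y] : List Int) = x :: [y] := rfl
    rw [hxy, consSub]
    rw [hget0']
    rcases hf : (PySem.List.pyRange 1 ((y :: t).length : Int) 1).foldl
        (runStep (condA (y :: t)) (valA (y :: t))) ([], [y]) with ⟨r, s⟩
    cases r with
    | nil => simp [extendRun]
    | cons g gs => simp [extendRun]
  · have hb : (y - x == 1) = false := by simpa using h
    rw [if_neg h, hb, pullout, hget0']
    simp [extendRun_false]

lemma B_def (lst : List Int) : split_udims_by_group_alt lst =
    ((0 :: ((PySem.List.pyRange 1 (lst.length : Int) 1).filter (fun i => !condA lst i)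
        ++ [(lst.length : Int)])).zip
     ((0 : Int) :: ((PySem.List.pyRange 1 (lst.length : Int) 1).filter (fun i => !condA lst i)
        ++ [(lst.length : Int)])).tail).map
      (fun ab => PySem.List.slice lst (some ab.1) (some ab.2)) := rfl

lemma B_succ (x y : Int) (t : List Int) :
    split_udims_by_group_alt (x :: y :: t) = extendRun x (y - x == 1) (split_udims_by_group_alt (y :: t)) := by
  rw [B_def, B_def]
  have hlen : ((x :: y :: t).length : Int) = ((y :: t).length : Int) + 1 := by simp
  have hcond1 : condA (x :: y :: t) 1 = (y - x == 1) := by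
    unfold condA
    rw [PySem.List.pyGetD_of_nonneg _ _ (by omega), show (1:Int) - 1 = 0 by norm_num,
        PySem.List.pyGetD_of_nonneg _ _ le_rfl]; rfl
  set N : Int := ((y :: t).length : Int) with hN
  have hN1 : 1 ≤ N := by simp [hN]
  rw [hlen, PySem.List.pyRange_one_cons (by omega), List.filter_cons, hcond1,
      show (1:Int) + 1 = 2 by norm_num, filter_shift x (y :: t)]
  set bs : List Int := (PySem.List.pyRange 1 N 1).filter (fun i => !condA (y :: t) i) with hbs
  have hmap : (bs.map (· + 1)) ++ [N + 1] = (bs ++ [N]).map (· + 1) := by simp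
  have hnn : ∀ z ∈ bs ++ [N], 0 ≤ z := by
    intro z hz
    rcases List.mem_append.mp hz with hz | hz
    · have := (PySem.List.mem_pyRange_one.mp (List.mem_of_mem_filter hz)).1; omega
    · simp at hz; omega
  rcases hcs : bs ++ [N] with _ | ⟨c0, cr⟩
  · exact absurd hcs (by simp)
  by_cases h : (y - x == 1) = true
  · rw [h]
    simp only [Bool.not_true, Bool.false_eq_true, if_false]
    rw [hmap, hcs]
    simp only [List.map_cons, List.tail_cons, List.zip_cons_cons, List.map_cons]
    have hc0 : 0 ≤ c0 := hnn c0 (by rw [hcs]; simp)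
    rw [slice_zero_succ x (y :: t) c0 hc0]
    have hsh := zip_tail_shift x (y :: t) (c0 :: cr) (by rw [← hcs]; exact hnn)
    simp only [List.map_cons, List.tail_cons] at hsh ⊢
    rw [hsh]
    rfl
  · have hb : (y - x == 1) = false := by simpa using h
    rw [hb]
    simp only [Bool.not_false, if_true]
    rw [List.cons_append, hmap, hcs]
    simp only [List.map_cons, List.tail_cons, List.zip_cons_cons, List.map_cons]
    have hc0 : 0 ≤ c0 := hnn c0 (by rw [hcs]; simp)
    have h01 : PySem.List.slice (x :: y :: t) (some 0) (some 1) = [x] := by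
      have := slice_zero_succ x (y :: t) 0 le_rfl
      rw [show (0:Int) + 1 = 1 by norm_num] at this
      rw [this, PySem.List.slice_toNat _ le_rfl le_rfl]
      rfl
    rw [h01, slice_one_succ x (y :: t) c0 hc0]
    have hsh := zip_tail_shift x (y :: t) (c0 :: cr) (by rw [← hcs]; exact hnn)
    simp only [List.map_cons, List.tail_cons] at hsh ⊢
    rw [hsh]
    rw [extendRun_false]

lemma AB_eq : ∀ (lst : List Int), lst ≠ [] → split_udims_by_group lst = split_udims_by_group_alt lst := by
  intro lst
  induction lst with
  | nil => intro h; exact absurd rfl h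
  | cons x rest ih =>
    intro _
    cases rest with
    | nil => rw [A_base, B_base]
    | cons y t => rw [A_succ, B_succ, ih (by simp)]

-- ===== VERDICT (by name: the statement is the Claim_ definition above) =====
theorem split_udims_by_group_spec : Claim_equal_split_udims_by_group := by
  intro lst _ hpre
  exact AB_eq lst hpre
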